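-- pv_equiv track=rewrite | github.com/TatsianaKV/belhard | 6.7.py | foo
-- ===== SOURCE A (Python) =====
-- def foo(numbers: list[int]) -> list[int]:
--     result = []
--     for i in range(len(numbers)):
--         if i + 1 != len(numbers):
--             result.append(numbers[i-1] + numbers[i+1])
--         else:
--             result.append(numbers[i-1] + numbers[0])
--     return result
-- ===== SOURCE B (Python) =====
-- def foo(numbers: list[int]) -> list[int]:
--     if not numbers:
--         return []
--     ext = numbers[-1:] + numbers + numbers[:1]
--     P = [0]
--     s = 0
--     for v in ext:
--         s += v
--         P.append(s)
--     return [P[i + 3] - P[i] - numbers[i] for i in range(len(numbers))]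
-- ===== Notes on version B (the rewrite author's own statement) =====
-- stated objective: alternative
-- what changed: Computes each cyclic neighbor sum as a prefix-sum window difference: build the padded list last+numbers+first, take its running prefix sums P, and return P[i+3]-P[i]-numbers[i], instead of A's per-index neighbor lookups with a wrap-around branch.
import Mathlib
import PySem

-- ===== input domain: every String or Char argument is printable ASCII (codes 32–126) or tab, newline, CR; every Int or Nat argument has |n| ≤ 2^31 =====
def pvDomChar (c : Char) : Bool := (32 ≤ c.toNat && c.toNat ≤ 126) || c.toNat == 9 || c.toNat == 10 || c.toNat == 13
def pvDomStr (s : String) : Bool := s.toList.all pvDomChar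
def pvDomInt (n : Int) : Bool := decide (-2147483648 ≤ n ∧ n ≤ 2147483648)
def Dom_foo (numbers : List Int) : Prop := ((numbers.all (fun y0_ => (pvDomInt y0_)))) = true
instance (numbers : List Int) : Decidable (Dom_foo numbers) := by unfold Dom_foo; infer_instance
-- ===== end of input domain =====

-- B replaces A's per-index neighbor lookups with a prefix-sum window difference over a padded copy (alternative decomposition; return value only).

-- ===== PORT A =====
-- literal port of A: one loop over range(len(numbers)), branching at the last index
def foo (numbers : List Int) : List Int :=
  (PySem.List.pyRange 0 numbers.length 1).foldl
    (fun result i =>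
      if i + 1 ≠ (numbers.length : Int) then
        result ++ [PySem.List.pyGetD numbers (i - 1) 0 + PySem.List.pyGetD numbers (i + 1) 0]
      else
        result ++ [PySem.List.pyGetD numbers (i - 1) 0 + PySem.List.pyGetD numbers 0 0]) []

-- ===== PORT B =====
-- literal port of Source B: pad with last and first, running prefix sums P, then P[i+3]-P[i]-numbers[i]
def foo_alt (numbers : List Int) : List Int :=
  if numbers = [] then []
  else
    let ext := PySem.List.slice numbers (some (-1)) none ++ numbers ++ PySem.List.slice numbers none (some 1)
    let Ps := ext.foldl (fun ps v => (ps.1 ++ [ps.2 + v], ps.2 + v)) ([(0 : Int)], (0 : Int))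
    (PySem.List.pyRange 0 numbers.length 1).map (fun i =>
      PySem.List.pyGetD Ps.1 (i + 3) 0 - PySem.List.pyGetD Ps.1 i 0 - PySem.List.pyGetD numbers i 0)

-- ===== PRECONDITION & SPEC =====
def Spec_foo (numbers : List Int) (out : List Int) : Prop := out = foo_alt numbers
instance (numbers : List Int) (out : List Int) : Decidable (Spec_foo numbers out) := by unfold Spec_foo; infer_instance

-- ===== CLAIM (what is proved, stated in full; the proofs are below) =====
def Claim_equal_foo : Prop := ∀ (numbers : List Int), Dom_foo numbers → Spec_foo numbers (foo numbers)

-- ===== LEMMAS AND PROOFS =====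

-- the accumulator of B's loop is the running prefix-sum list
lemma foldl_prefix (l : List Int) (P : List Int) (s : Int) :
    l.foldl (fun (ps : List Int × Int) v => (ps.1 ++ [ps.2 + v], ps.2 + v)) (P, s)
      = (P ++ (List.range l.length).map (fun k => s + (l.take (k + 1)).sum), s + l.sum) := by
  induction l generalizing P s with
  | nil => simp
  | cons v t ih =>
    simp only [List.foldl_cons, ih, List.length_cons, List.sum_cons, Prod.mk.injEq]
    constructor
    · rw [List.range_succ_eq_map]
      simp [List.append_assoc, Function.comp, List.take_succ_cons, add_assoc]
    · ring

lemma fooA_eq_map (numbers : List Int) :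
    foo numbers = (List.range numbers.length).map (fun (k : Nat) =>
      if (k : Int) + 1 ≠ (numbers.length : Int) then
        PySem.List.pyGetD numbers ((k : Int) - 1) 0 + PySem.List.pyGetD numbers ((k : Int) + 1) 0
      else
        PySem.List.pyGetD numbers ((k : Int) - 1) 0 + PySem.List.pyGetD numbers 0 0) := by
  unfold foo
  have h : (fun (result : List Int) (i : Int) =>
      if i + 1 ≠ (numbers.length : Int) then
        result ++ [PySem.List.pyGetD numbers (i - 1) 0 + PySem.List.pyGetD numbers (i + 1) 0]
      else
        result ++ [PySem.List.pyGetD numbers (i - 1) 0 + PySem.List.pyGetD numbers 0 0])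
      = fun result i => result ++ [if i + 1 ≠ (numbers.length : Int) then
        PySem.List.pyGetD numbers (i - 1) 0 + PySem.List.pyGetD numbers (i + 1) 0
      else
        PySem.List.pyGetD numbers (i - 1) 0 + PySem.List.pyGetD numbers 0 0] := by
    funext r i; split_ifs <;> rfl
  rw [h, PySem.List.pyRange_zero_natCast, List.foldl_map,
    PySem.List.foldl_append_singleton_eq_map, List.nil_append]

lemma foo_eq_foo_alt (numbers : List Int) : foo numbers = foo_alt numbers := by
  rcases numbers with _ | ⟨a, rest⟩
  · rfl
  set xs := a :: rest with hxs
  have hne : xs ≠ [] := by simp [hxs]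
  have hn : 1 ≤ xs.length := by simp [hxs]
  rw [fooA_eq_map]
  unfold foo_alt
  rw [if_neg hne]
  simp only [foldl_prefix, PySem.List.pyRange_zero_natCast, List.map_map]
  set ext := PySem.List.slice xs (some (-1)) none ++ xs ++ PySem.List.slice xs none (some 1)
    with hext
  have htake1 : PySem.List.slice xs none (some 1) = List.take 1 xs := by
    exact_mod_cast PySem.List.slice_to_natCast xs 1
  have hext_split : ext = xs.getLast hne :: (xs ++ [xs.getD 0 0]) := by
    rw [hext, PySem.List.slice_from_neg_one, htake1]
    rw [List.drop_eq_getElem_cons (by omega), List.getLast_eq_getElem]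
    have hd : xs.drop (xs.length - 1 + 1) = [] := by
      apply List.drop_eq_nil_of_le; omega
    rw [hd]
    have ht1 : xs.take 1 = [xs.getD 0 0] := by
      rcases xs with _ | ⟨b, t⟩
      · exact absurd rfl hne
      · simp
    rw [ht1]; simp
  have hextlen : ext.length = xs.length + 2 := by simp [hext_split]
  -- entries of ext
  have hE0 : ext.getD 0 0 = xs.getLast hne := by rw [hext_split]; rfl
  have hEs : ∀ j : Nat, ext.getD (j + 1) 0 = (xs ++ [xs.getD 0 0]).getD j 0 := by
    intro j; rw [hext_split]; rfl
  -- prefix list P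
  set P : List Int := [(0 : Int)] ++ (List.range ext.length).map
      (fun k => 0 + (ext.take (k + 1)).sum) with hP
  have hPget : ∀ j : Nat, j ≤ ext.length → P.getD j 0 = (ext.take j).sum := by
    intro j hj
    rcases j with _ | j
    · simp [hP]
    · rw [hP]
      rw [List.getD_eq_getElem _ 0 (by simp; omega)]
      rw [List.getElem_append_right (by simp)]
      simp
  apply List.ext_getElem
  · simp
  intro k hk hk2
  simp only [List.getElem_map, List.getElem_range, Function.comp]
  have hkn : k < xs.length := by simpa using hk
  have hc3 : ((k : Nat) : Int) + 3 = ((k + 3 : Nat) : Int) := by push_cast; ring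
  rw [hc3, PySem.List.pyGetD_natCast, PySem.List.pyGetD_natCast, PySem.List.pyGetD_natCast]
  rw [hPget (k + 3) (by omega), hPget k (by omega)]
  have htake : ext.take (k + 3) = ext.take k ++ (ext.drop k).take 3 := by
    rw [← List.take_add]
  have hdrop3 : (ext.drop k).take 3 = [ext.getD k 0, ext.getD (k + 1) 0, ext.getD (k + 2) 0] := by
    apply List.ext_getElem
    · simp; omega
    intro j hj _
    have hj3 : j < 3 := by simp at hj; omega
    simp only [List.getElem_take, List.getElem_drop]
    interval_cases j <;>
      simp only [List.getD_eq_getElem?_getD, List.getElem_cons_zero, List.getElem_cons_succ] <;>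
      rw [List.getElem?_eq_getElem (by omega)] <;> simp
  rw [htake, List.sum_append, hdrop3]
  simp only [List.sum_cons, List.sum_nil, add_zero]
  -- middle entry cancels numbers[k]
  have hmid : ext.getD (k + 1) 0 = PySem.List.pyGetD xs (k : Int) 0 := by
    rw [hEs, List.getD_append _ _ _ _ hkn, PySem.List.pyGetD_natCast]
  -- first entry: left neighbor
  have hleft : ext.getD k 0 = PySem.List.pyGetD xs ((k : Int) - 1) 0 := by
    rcases Nat.eq_zero_or_pos k with h0 | h0
    · subst h0
      rw [hE0]
      simp only [Nat.cast_zero, zero_sub]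
      rw [PySem.List.pyGetD_neg_one xs 0 hne]
    · obtain ⟨j, rfl⟩ : ∃ j, k = j + 1 := ⟨k - 1, by omega⟩
      rw [hEs, List.getD_append _ _ _ _ (by omega)]
      have hc : ((j + 1 : Nat) : Int) - 1 = ((j : Nat) : Int) := by push_cast; ring
      rw [hc, PySem.List.pyGetD_natCast]
  -- third entry: right neighbor or wrap
  have hright : ext.getD (k + 2) 0
      = if (k : Int) + 1 ≠ (xs.length : Int) then PySem.List.pyGetD xs ((k : Int) + 1) 0
        else PySem.List.pyGetD xs 0 0 := by
    have h2 : k + 2 = (k + 1) + 1 := rfl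
    rw [h2, hEs]
    rcases Nat.lt_or_ge (k + 1) xs.length with hlt | hge
    · rw [List.getD_append _ _ _ _ hlt, if_pos (by omega)]
      have hc : ((k : Nat) : Int) + 1 = ((k + 1 : Nat) : Int) := by push_cast; ring
      rw [hc, PySem.List.pyGetD_natCast]
    · have hkeq : k + 1 = xs.length := by omega
      rw [List.getD_append_right _ _ _ _ (by omega), if_neg (by omega)]
      have h0 : k + 1 - xs.length = 0 := by omega
      rw [h0]
      have e0 : PySem.List.pyGetD xs 0 0 = xs.getD 0 0 := by
        simpa using PySem.List.pyGetD_natCast xs 0 0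
      rw [e0]; rfl
  rw [hmid, hleft, hright]
  have hmk : PySem.List.pyGetD xs ((k : Nat) : Int) 0 = xs.getD k 0 :=
    PySem.List.pyGetD_natCast xs k 0
  rw [hmk]
  split_ifs <;> ring

-- ===== VERDICT (by name: the statement is the Claim_ definition above) =====
theorem foo_spec : Claim_equal_foo := by
  intro numbers _
  unfold Spec_foo
  exact foo_eq_foo_alt numbers
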